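-- pv_equiv track=rewrite | github.com/Nico-Santos/Fundamento_Informatica | Guia_TP/clase31_05funciones.py | tiene3Digitos
-- ===== SOURCE A (Python) =====
-- def tiene3Digitos(valor):
--     digitos = 0
--     while(valor > 0):
--         digitos += 1
--         valor //= 10
--     if(digitos == 3):
--         return True
--     else:
--         return False
-- ===== SOURCE B (Python) =====
-- def tiene3Digitos(valor):
--     return 100 <= valor <= 999
-- ===== Notes on version B (the rewrite author's own statement) =====
-- stated objective: simpler
-- what changed: Replaces the while-loop that counts digits by repeated floor division with a single closed-form three-digit range comparison.
import Mathlib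
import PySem

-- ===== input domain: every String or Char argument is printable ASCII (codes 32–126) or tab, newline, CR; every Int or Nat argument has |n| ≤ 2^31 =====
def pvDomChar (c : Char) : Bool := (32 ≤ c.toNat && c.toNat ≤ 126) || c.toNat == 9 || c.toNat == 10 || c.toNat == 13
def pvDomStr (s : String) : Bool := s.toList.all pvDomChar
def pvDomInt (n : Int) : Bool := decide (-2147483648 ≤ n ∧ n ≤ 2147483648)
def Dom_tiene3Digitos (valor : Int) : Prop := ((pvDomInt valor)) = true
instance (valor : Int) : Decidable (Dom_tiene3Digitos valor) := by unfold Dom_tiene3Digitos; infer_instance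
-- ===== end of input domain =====

-- B replaces A's digit-counting loop with the closed-form range test 100 ≤ valor ≤ 999 (simpler).

-- ===== PORT A =====
-- the while-loop of A: counts digits by repeated floor division by 10
def tiene3DigitosLoop (valor digitos : Int) : Int :=
  if valor > 0 then tiene3DigitosLoop (PySem.Int.floordiv valor 10) (digitos + 1)
  else digitos
termination_by valor.toNat
decreasing_by
  rw [PySem.Int.floordiv_eq_ediv_of_pos (by omega : (0:Int) < 10)]
  omega

def tiene3Digitos (valor : Int) : Bool :=
  if tiene3DigitosLoop valor 0 = 3 then true else false

-- ===== PORT B =====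
def tiene3Digitos_alt (valor : Int) : Bool :=
  decide (100 ≤ valor ∧ valor ≤ 999)

-- ===== PRECONDITION & SPEC =====
def Spec_tiene3Digitos (valor : Int) (out : Bool) : Prop := out = tiene3Digitos_alt valor
instance (valor : Int) (out : Bool) : Decidable (Spec_tiene3Digitos valor out) := by unfold Spec_tiene3Digitos; infer_instance

-- ===== CLAIM (what is proved, stated in full; the proofs are below) =====
def Claim_equal_tiene3Digitos : Prop := ∀ (valor : Int), Dom_tiene3Digitos valor → Spec_tiene3Digitos valor (tiene3Digitos valor)

-- ===== LEMMAS AND PROOFS =====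
theorem floordiv10_eq (a : Int) : PySem.Int.floordiv a 10 = a / 10 :=
  PySem.Int.floordiv_eq_ediv_of_pos (by omega)

theorem loop_step (v d : Int) (h : v > 0) :
    tiene3DigitosLoop v d = tiene3DigitosLoop (v / 10) (d + 1) := by
  rw [tiene3DigitosLoop, if_pos h, floordiv10_eq]

theorem loop_stop (v d : Int) (h : ¬ v > 0) : tiene3DigitosLoop v d = d := by
  rw [tiene3DigitosLoop, if_neg h]

theorem loop_ge (v d : Int) : d ≤ tiene3DigitosLoop v d := by
  rw [tiene3DigitosLoop]
  split
  · have := loop_ge (PySem.Int.floordiv v 10) (d + 1)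
    omega
  · omega
termination_by v.toNat
decreasing_by
  rw [floordiv10_eq]; omega

theorem loop_characterization (v : Int) :
    (tiene3DigitosLoop v 0 = 3) ↔ (100 ≤ v ∧ v ≤ 999) := by
  by_cases h0 : v > 0
  · by_cases h1 : v ≤ 9
    · rw [loop_step v 0 h0, loop_stop _ _ (by omega)]
      omega
    · by_cases h2 : v ≤ 99
      · rw [loop_step v 0 h0, loop_step _ _ (by omega), loop_stop _ _ (by omega)]
        omega
      · by_cases h3 : v ≤ 999
        · rw [loop_step v 0 h0, loop_step _ _ (by omega), loop_step _ _ (by omega),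
            loop_stop _ _ (by omega)]
          omega
        · rw [loop_step v 0 h0, loop_step _ _ (by omega), loop_step _ _ (by omega),
            loop_step _ _ (by omega)]
          have hge := loop_ge (v / 10 / 10 / 10 / 10) (0+1+1+1+1)
          constructor
          · intro he; omega
          · intro hr; omega
  · rw [loop_stop _ _ h0]
    omega

-- ===== VERDICT (by name: the statement is the Claim_ definition above) =====
theorem tiene3Digitos_spec : Claim_equal_tiene3Digitos := by
  intro v _
  unfold Spec_tiene3Digitos tiene3Digitos tiene3Digitos_alt
  have h := loop_characterization v
  by_cases hr : 100 ≤ v ∧ v ≤ 999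
  · rw [if_pos (h.mpr hr), decide_eq_true hr]
  · rw [if_neg (fun he => hr (h.mp he)), decide_eq_false hr]
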